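-- pv_equiv track=rewrite | github.com/ayushnangia/cracking-ARC-AGI | nca-code/evaluate.py | calculate_union_accuracy
-- ===== SOURCE A (Python) =====
-- def _pad_grid(grid, target_h, target_w, pad_value=-1):
--     """Pads a grid to target dimensions with a specified pad_value."""
--     padded = [[pad_value] * target_w for _ in range(target_h)]
--     # Ensure grid is not empty and has inner lists before iterating
--     if grid and grid[0] and isinstance(grid[0], list):
--         for r_idx in range(len(grid)):
--             for c_idx in range(len(grid[0])):
--                 # Copy existing values to the padded grid
--                 padded[r_idx][c_idx] = grid[r_idx][c_idx]
--     return padded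
--
-- def calculate_union_accuracy(pred_grid, true_grid, pad_value=-1):
--     """
--     Calculates pixel accuracy between two grids based on their union.
--     Cells present in one grid but not the other (within the union bounding box)
--     are treated as mismatches against the pad_value.
--     Returns (matched_pixels, total_union_pixels).
--     """
--     true_h = len(true_grid)
--     true_w = len(true_grid[0]) if true_h > 0 else 0
--     pred_h = len(pred_grid)
--     pred_w = len(pred_grid[0]) if pred_h > 0 else 0
--
--     common_h = max(true_h, pred_h)
--     common_w = max(true_w, pred_w)
--
--     padded_true = _pad_grid(true_grid, common_h, common_w, pad_value)
--     padded_pred = _pad_grid(pred_grid, common_h, common_w, pad_value)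
--
--     matched_pixels = 0
--     total_union_pixels = 0
--
--     # Iterate over the bounding box of the union
--     for r in range(common_h):
--         for c in range(common_w):
--             # Check if the cell (r, c) exists in the original prediction or ground truth grid
--             in_pred_orig = (r < pred_h and c < pred_w)
--             in_true_orig = (r < true_h and c < true_w)
--
--             if in_pred_orig or in_true_orig:
--                 total_union_pixels += 1 # This cell is part of the union
--
--                 val_pred = padded_pred[r][c]
--                 val_true = padded_true[r][c]
--
--                 # Only count as a match if their values are identical at this position
--                 # (This implicitly handles cases where one is padding and the other is not - they won't match)
--                 if val_pred == val_true:
--                     matched_pixels += 1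
--
--     return matched_pixels, total_union_pixels
-- ===== SOURCE B (Python) =====
-- def calculate_union_accuracy(pred_grid, true_grid, pad_value=-1):
--     """
--     Same result as the padded-union-box scan, but without building padded
--     copies: total comes from inclusion-exclusion, and matches are counted
--     by scanning each grid's own region.
--     """
--     pred_h = len(pred_grid)
--     pred_w = len(pred_grid[0]) if pred_h > 0 else 0
--     true_h = len(true_grid)
--     true_w = len(true_grid[0]) if true_h > 0 else 0
--
--     total_union_pixels = (pred_h * pred_w + true_h * true_w
--                           - min(pred_h, true_h) * min(pred_w, true_w))
--
--     matched_pixels = 0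
--     # Cells of the prediction's region: compare against truth where it
--     # overlaps, against the pad value elsewhere.
--     for r in range(pred_h):
--         row = pred_grid[r]
--         for c in range(pred_w):
--             v = row[c]
--             if r < true_h and c < true_w:
--                 if v == true_grid[r][c]:
--                     matched_pixels += 1
--             elif v == pad_value:
--                 matched_pixels += 1
--     # Cells of the truth's region that lie outside the prediction's region
--     # match exactly when they hold the pad value.
--     for r in range(true_h):
--         row = true_grid[r]
--         for c in range(true_w):
--             if not (r < pred_h and c < pred_w) and row[c] == pad_value:
--                 matched_pixels += 1
--     return matched_pixels, total_union_pixels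
-- ===== Notes on version B (the rewrite author's own statement) =====
-- stated objective: faster
-- what changed: Instead of allocating two padded copies of the grids and scanning the union bounding box, B computes the union size in closed form by inclusion-exclusion and counts matches by scanning each grid's own region directly (prediction region first, then the truth-only cells), never materialising padded grids.
import Mathlib
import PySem

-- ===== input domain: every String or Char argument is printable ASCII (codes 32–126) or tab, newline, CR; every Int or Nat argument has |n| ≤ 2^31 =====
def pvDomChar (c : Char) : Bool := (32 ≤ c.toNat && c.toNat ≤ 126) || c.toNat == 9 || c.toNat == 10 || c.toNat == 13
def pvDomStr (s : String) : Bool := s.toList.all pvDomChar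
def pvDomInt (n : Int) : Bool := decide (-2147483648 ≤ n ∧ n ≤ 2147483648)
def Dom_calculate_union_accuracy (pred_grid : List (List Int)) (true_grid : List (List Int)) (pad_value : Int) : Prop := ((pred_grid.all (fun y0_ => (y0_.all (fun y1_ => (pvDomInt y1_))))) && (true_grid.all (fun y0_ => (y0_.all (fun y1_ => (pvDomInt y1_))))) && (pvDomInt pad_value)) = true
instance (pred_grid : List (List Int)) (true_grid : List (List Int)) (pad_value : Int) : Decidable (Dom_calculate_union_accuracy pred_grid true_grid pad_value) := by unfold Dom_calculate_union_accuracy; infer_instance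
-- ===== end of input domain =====

-- B replaces A's padded-grid construction and union-box scan by a closed-form
-- inclusion-exclusion total and direct scans of each grid's own region, avoiding the
-- padded allocations (objective: faster, measured).

-- ===== PORT A =====
-- _pad_grid: builds a target_h × target_w grid of pad_value and copies grid[r][c] for
-- r < len(grid), c < len(grid[0]); the mutation padded[r][c] = grid[r][c] becomes List.set.
-- grid[r][c] is read with getD; Pre_ restricts to inputs where every such read is in range
-- (Python raises IndexError when a row is shorter than grid[0]).
def pv_pad_grid (grid : List (List Int)) (target_h target_w : Nat) (pad_value : Int) : List (List Int) :=
  let padded := List.replicate target_h (List.replicate target_w pad_value)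
  if grid ≠ [] ∧ grid.headI ≠ [] then
    (List.range grid.length).foldl (fun p r =>
      (List.range grid.headI.length).foldl (fun p c =>
        p.set r ((p.getD r []).set c ((grid.getD r []).getD c 0))) p) padded
  else padded

-- the in_pred_orig/in_true_orig flags of A are inlined into the if condition
def calculate_union_accuracy (pred_grid : List (List Int)) (true_grid : List (List Int)) (pad_value : Int) : Int × Int :=
  let true_h := true_grid.length
  let true_w := if true_h > 0 then true_grid.headI.length else 0
  let pred_h := pred_grid.length
  let pred_w := if pred_h > 0 then pred_grid.headI.length else 0
  let common_h := max true_h pred_h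
  let common_w := max true_w pred_w
  let padded_true := pv_pad_grid true_grid common_h common_w pad_value
  let padded_pred := pv_pad_grid pred_grid common_h common_w pad_value
  (List.range common_h).foldl (fun acc r =>
    (List.range common_w).foldl (fun acc c =>
      if (r < pred_h ∧ c < pred_w) ∨ (r < true_h ∧ c < true_w) then
        let acc1 := (acc.1, acc.2 + 1)
        let val_pred := ((padded_pred.getD r []).getD c 0)
        let val_true := ((padded_true.getD r []).getD c 0)
        if val_pred = val_true then (acc1.1 + 1, acc1.2) else acc1
      else acc) acc) ((0 : Int), (0 : Int))

-- ===== PORT B =====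
def calculate_union_accuracy_alt (pred_grid : List (List Int)) (true_grid : List (List Int)) (pad_value : Int) : Int × Int :=
  let pred_h := pred_grid.length
  let pred_w := if pred_h > 0 then pred_grid.headI.length else 0
  let true_h := true_grid.length
  let true_w := if true_h > 0 then true_grid.headI.length else 0
  let total : Int := (pred_h : Int) * (pred_w : Int) + (true_h : Int) * (true_w : Int)
      - (min pred_h true_h : Int) * (min pred_w true_w : Int)
  let m1 := (List.range pred_h).foldl (fun m r =>
    let row := pred_grid.getD r []
    (List.range pred_w).foldl (fun m c =>
      let v := row.getD c 0
      if r < true_h ∧ c < true_w then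
        if v = (true_grid.getD r []).getD c 0 then m + 1 else m
      else if v = pad_value then m + 1 else m) m) (0 : Int)
  let m2 := (List.range true_h).foldl (fun m r =>
    let row := true_grid.getD r []
    (List.range true_w).foldl (fun m c =>
      if ¬(r < pred_h ∧ c < pred_w) ∧ row.getD c 0 = pad_value then m + 1 else m) m) m1
  (m2, total)

-- ===== PRECONDITION & SPEC =====
-- Pre_ excludes exactly the ragged grids on which the Python A raises IndexError: a row
-- shorter than the grid's first row makes _pad_grid read grid[r][c] out of range.
def Pre_calculate_union_accuracy (pred_grid : List (List Int)) (true_grid : List (List Int)) (pad_value : Int) : Prop :=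
  (∀ row ∈ pred_grid, pred_grid.headI.length ≤ row.length) ∧
  (∀ row ∈ true_grid, true_grid.headI.length ≤ row.length)
instance (pred_grid : List (List Int)) (true_grid : List (List Int)) (pad_value : Int) : Decidable (Pre_calculate_union_accuracy pred_grid true_grid pad_value) := by unfold Pre_calculate_union_accuracy; infer_instance

def pvWitness_calculate_union_accuracy : List (List Int) × List (List Int) × Int :=
  ([[1, 2], [3, 4]], [[1, 0, 5]], -1)

def Spec_calculate_union_accuracy (pred_grid : List (List Int)) (true_grid : List (List Int)) (pad_value : Int) (out : Int × Int) : Prop := out = calculate_union_accuracy_alt pred_grid true_grid pad_value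
instance (pred_grid : List (List Int)) (true_grid : List (List Int)) (pad_value : Int) (out : Int × Int) : Decidable (Spec_calculate_union_accuracy pred_grid true_grid pad_value out) := by unfold Spec_calculate_union_accuracy; infer_instance

-- ===== CLAIM (what is proved, stated in full; the proofs are below) =====
def Claim_equal_calculate_union_accuracy : Prop := ∀ (pred_grid : List (List Int)) (true_grid : List (List Int)) (pad_value : Int), Dom_calculate_union_accuracy pred_grid true_grid pad_value → Pre_calculate_union_accuracy pred_grid true_grid pad_value → Spec_calculate_union_accuracy pred_grid true_grid pad_value (calculate_union_accuracy pred_grid true_grid pad_value)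

-- ===== LEMMAS AND PROOFS =====

-- `if len > 0 then headI.length else 0` is just headI.length
theorem pv_w_eq (l : List (List Int)) : (if l.length > 0 then l.headI.length else 0) = l.headI.length := by
  cases l with
  | nil => rfl
  | cons a t => simp

-- setting cells preserves row length
theorem pv_rowfold_len (cs : List Nat) (v : Nat → Int) (row0 : List Int) :
    (cs.foldl (fun row c => row.set c (v c)) row0).length = row0.length := by
  induction cs generalizing row0 with
  | nil => rfl
  | cons c cs ih => rw [List.foldl_cons, ih, List.length_set]

-- value of a cell after the row-copy fold
theorem pv_rowfold_getD (w : Nat) (v : Nat → Int) (row0 : List Int) (hw : w ≤ row0.length) (c : Nat) :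
    ((List.range w).foldl (fun row c => row.set c (v c)) row0).getD c 0
      = if c < w then v c else row0.getD c 0 := by
  induction w with
  | zero => simp
  | succ n ih =>
    rw [List.range_succ, List.foldl_append]
    simp only [List.foldl_cons, List.foldl_nil]
    by_cases hc : c = n
    · subst hc
      have hlen : c < ((List.range c).foldl (fun row c => row.set c (v c)) row0).length := by
        rw [pv_rowfold_len]; omega
      simp [List.getD, List.getElem?_set_self hlen]
    · rw [List.getD, List.getElem?_set_ne (by omega), ← List.getD]
      rw [ih (by omega)]
      split_ifs <;> (try rfl) <;> omega

-- the inner fold of _pad_grid rewrites the whole row r in one set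
theorem pv_innerfold_set (cs : List Nat) (r : Nat) (v : Nat → Int) :
    ∀ p : List (List Int), r < p.length →
      cs.foldl (fun p c => p.set r ((p.getD r []).set c (v c))) p
        = p.set r (cs.foldl (fun row c => row.set c (v c)) (p.getD r [])) := by
  induction cs with
  | nil =>
    intro p hr
    simp only [List.foldl_nil]
    rw [List.getD_eq_getElem p [] hr]
    exact (List.set_getElem_self hr).symm
  | cons c cs ih =>
    intro p hr
    simp only [List.foldl_cons]
    rw [ih _ (by simpa using hr)]
    rw [List.set_set]
    congr 1
    rw [List.getD, List.getElem?_set_self (by simpa using hr)]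
    rfl

-- the nested _pad_grid fold preserves the outer length
theorem pv_padfold_len (rs : List Nat) (w : Nat) (v : Nat → Nat → Int) :
    ∀ p : List (List Int),
      (rs.foldl (fun p rr => (List.range w).foldl
        (fun p c => p.set rr ((p.getD rr []).set c (v rr c))) p) p).length = p.length := by
  induction rs with
  | nil => intro p; rfl
  | cons rr rs ih =>
    intro p
    rw [List.foldl_cons, ih]
    have h : ∀ (cs : List Nat) (q : List (List Int)),
        (cs.foldl (fun p c => p.set rr ((p.getD rr []).set c (v rr c))) q).length = q.length := by
      intro cs
      induction cs with
      | nil => intro q; rfl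
      | cons c cs ih2 =>
        intro q
        rw [List.foldl_cons, ih2, List.length_set]
    exact h _ p

-- each row of the _pad_grid fold: copied rows get the row-copy fold, others are untouched
theorem pv_padfold_getD (n w : Nat) (v : Nat → Nat → Int) (padded : List (List Int))
    (hn : n ≤ padded.length) (r : Nat) :
    ((List.range n).foldl (fun p rr => (List.range w).foldl
        (fun p c => p.set rr ((p.getD rr []).set c (v rr c))) p) padded).getD r []
      = if r < n then (List.range w).foldl (fun row c => row.set c (v r c)) (padded.getD r [])
        else padded.getD r [] := by
  induction n with
  | zero => simp
  | succ n ih =>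
    rw [List.range_succ, List.foldl_append]
    simp only [List.foldl_cons, List.foldl_nil]
    have hlen : ((List.range n).foldl (fun p rr => (List.range w).foldl
        (fun p c => p.set rr ((p.getD rr []).set c (v rr c))) p) padded).length = padded.length :=
      pv_padfold_len _ _ _ _
    rw [pv_innerfold_set _ n _ _ (by omega)]
    by_cases hr : r = n
    · subst hr
      rw [List.getD, List.getElem?_set_self (by omega)]
      simp only [Option.getD_some]
      rw [ih (by omega), if_neg (by omega), if_pos (by omega)]
    · rw [List.getD, List.getElem?_set_ne (by omega), ← List.getD, ih (by omega)]
      split_ifs <;> (try rfl) <;> omega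

-- the padded grid read at (r,c) inside the target box
theorem pv_pad_getD (grid : List (List Int)) (th tw : Nat) (pad : Int)
    (hh : grid.length ≤ th) (hw : grid.headI.length ≤ tw) (r c : Nat) (hr : r < th) (hc : c < tw) :
    ((pv_pad_grid grid th tw pad).getD r []).getD c 0
      = if r < grid.length ∧ c < grid.headI.length then (grid.getD r []).getD c 0 else pad := by
  have hrepl : ∀ i : Nat, i < th →
      ((List.replicate th (List.replicate tw pad) : List (List Int)).getD i []) = List.replicate tw pad := by
    intro i hi
    rw [List.getD, List.getElem?_replicate, if_pos hi]
    rfl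
  have hpadval : (List.replicate tw pad : List Int).getD c 0 = pad := by
    rw [List.getD, List.getElem?_replicate, if_pos hc]
    rfl
  unfold pv_pad_grid
  simp only []
  by_cases hg : grid ≠ [] ∧ grid.headI ≠ []
  · rw [if_pos hg]
    rw [pv_padfold_getD grid.length grid.headI.length _ _ (by simpa using hh) r]
    by_cases hrg : r < grid.length
    · rw [if_pos hrg, hrepl r hr,
        pv_rowfold_getD _ _ _ (by simpa using hw) c]
      by_cases hcg : c < grid.headI.length
      · rw [if_pos hcg, if_pos ⟨hrg, hcg⟩]
      · rw [if_neg hcg, if_neg (by tauto), hpadval]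
    · rw [if_neg hrg, if_neg (by tauto), hrepl r hr, hpadval]
  · rw [if_neg hg]
    rw [hrepl r hr, hpadval]
    rcases not_and_or.mp hg with h | h
    · have : grid = [] := by simpa using h
      subst this
      simp
    · have : grid.headI = [] := by simpa using h
      rw [if_neg (by simp [this])]

-- an additive fold over range is a sum
theorem pv_foldl_range_add (n : Nat) (f : Nat → Int) :
    ∀ init : Int, (List.range n).foldl (fun m x => m + f x) init
      = init + ∑ x ∈ Finset.range n, f x := by
  induction n with
  | zero => intro init; simp
  | succ n ih =>
    intro init
    rw [List.range_succ, List.foldl_append, ih, Finset.sum_range_succ]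
    simp [add_assoc]

-- a componentwise-additive pair fold over range is a pair of sums
theorem pv_foldl_range_pair (n : Nat) (f g : Nat → Int) :
    ∀ init : Int × Int, (List.range n).foldl (fun a x => (a.1 + f x, a.2 + g x)) init
      = (init.1 + ∑ x ∈ Finset.range n, f x, init.2 + ∑ x ∈ Finset.range n, g x) := by
  induction n with
  | zero => intro init; simp
  | succ n ih =>
    intro init
    rw [List.range_succ, List.foldl_append, ih, Finset.sum_range_succ, Finset.sum_range_succ]
    simp [add_assoc]

-- a sum over range M of a function supported below m ≤ M shrinks to range m
theorem pv_sum_if_lt {g : Nat → Int} {m M : Nat} (h : m ≤ M) :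
    ∑ x ∈ Finset.range M, (if x < m then g x else 0) = ∑ x ∈ Finset.range m, g x := by
  have hsub : Finset.range m ⊆ Finset.range M := by
    intro x hx
    simp only [Finset.mem_range] at hx ⊢
    omega
  rw [← Finset.sum_subset hsub (fun x _ hx => if_neg (by simpa using hx))]
  exact Finset.sum_congr rfl fun x hx => if_pos (Finset.mem_range.1 hx)

-- a double sum over a box of a function supported on a sub-rectangle shrinks to it
theorem pv_sum_box (f : Nat → Nat → Int) (n m N M : Nat) (hn : n ≤ N) (hm : m ≤ M) :
    ∑ r ∈ Finset.range N, ∑ c ∈ Finset.range M, (if r < n ∧ c < m then f r c else 0)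
      = ∑ r ∈ Finset.range n, ∑ c ∈ Finset.range m, f r c := by
  have h1 : ∀ r : Nat, ∑ c ∈ Finset.range M, (if r < n ∧ c < m then f r c else 0)
      = if r < n then ∑ c ∈ Finset.range m, f r c else 0 := by
    intro r
    by_cases hr : r < n
    · rw [if_pos hr, ← pv_sum_if_lt hm]
      exact Finset.sum_congr rfl fun c _ => by simp [hr]
    · rw [if_neg hr]
      simp [hr]
  rw [Finset.sum_congr rfl fun r _ => h1 r, pv_sum_if_lt hn]

-- inclusion–exclusion for the union-box indicator
theorem pv_union_count (ph pw th tw : Nat) :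
    ∑ r ∈ Finset.range (max th ph), ∑ c ∈ Finset.range (max tw pw),
        (if (r < ph ∧ c < pw) ∨ (r < th ∧ c < tw) then (1 : Int) else 0)
      = (ph : Int) * (pw : Int) + (th : Int) * (tw : Int)
        - (min ph th : Int) * (min pw tw : Int) := by
  have hpt : ∀ r c : Nat, (if (r < ph ∧ c < pw) ∨ (r < th ∧ c < tw) then (1 : Int) else 0)
      = (if r < ph ∧ c < pw then (1 : Int) else 0) + (if r < th ∧ c < tw then (1 : Int) else 0)
        - (if r < min ph th ∧ c < min pw tw then (1 : Int) else 0) := by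
    intro r c
    have : (r < min ph th ∧ c < min pw tw) ↔ ((r < ph ∧ c < pw) ∧ (r < th ∧ c < tw)) := by omega
    rw [if_congr this rfl rfl]
    split_ifs <;> omega
  have hrect : ∀ n m : Nat, n ≤ max th ph → m ≤ max tw pw →
      ∑ r ∈ Finset.range (max th ph), ∑ c ∈ Finset.range (max tw pw),
          (if r < n ∧ c < m then (1 : Int) else 0) = (n : Int) * (m : Int) := by
    intro n m hn hm
    rw [pv_sum_box (fun _ _ => (1 : Int)) n m _ _ hn hm]
    simp [Finset.sum_const, Finset.card_range]
  calc ∑ r ∈ Finset.range (max th ph), ∑ c ∈ Finset.range (max tw pw),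
        (if (r < ph ∧ c < pw) ∨ (r < th ∧ c < tw) then (1 : Int) else 0)
      = ∑ r ∈ Finset.range (max th ph), ∑ c ∈ Finset.range (max tw pw),
        ((if r < ph ∧ c < pw then (1 : Int) else 0) + (if r < th ∧ c < tw then (1 : Int) else 0)
          - (if r < min ph th ∧ c < min pw tw then (1 : Int) else 0)) := by
        exact Finset.sum_congr rfl fun r _ => Finset.sum_congr rfl fun c _ => hpt r c
    _ = (ph : Int) * (pw : Int) + (th : Int) * (tw : Int)
        - (min ph th : Int) * (min pw tw : Int) := by
        simp only [Finset.sum_sub_distrib, Finset.sum_add_distrib]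
        rw [hrect ph pw (le_max_right _ _) (le_max_right _ _),
          hrect th tw (le_max_left _ _) (le_max_left _ _),
          hrect (min ph th) (min pw tw) (by omega) (by omega)]
        push_cast
        ring

-- A's union-box pair fold evaluates to a pair of indicator sums
theorem pv_A_eval (ch cw ph pw th tw : Nat) (P T : Nat → Nat → Int) :
    (List.range ch).foldl (fun acc r =>
      (List.range cw).foldl (fun acc c =>
        if (r < ph ∧ c < pw) ∨ (r < th ∧ c < tw) then
          if P r c = T r c then ((acc.1, acc.2 + 1).1 + 1, (acc.1, acc.2 + 1).2)
          else (acc.1, acc.2 + 1)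
        else acc) acc) ((0 : Int), (0 : Int))
    = (∑ r ∈ Finset.range ch, ∑ c ∈ Finset.range cw,
         (if ((r < ph ∧ c < pw) ∨ (r < th ∧ c < tw)) ∧ P r c = T r c then (1 : Int) else 0),
       ∑ r ∈ Finset.range ch, ∑ c ∈ Finset.range cw,
         (if (r < ph ∧ c < pw) ∨ (r < th ∧ c < tw) then (1 : Int) else 0)) := by
  have hinner : ∀ r : Nat, (fun (acc : Int × Int) (c : Nat) =>
      if (r < ph ∧ c < pw) ∨ (r < th ∧ c < tw) then
        if P r c = T r c then ((acc.1, acc.2 + 1).1 + 1, (acc.1, acc.2 + 1).2)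
        else (acc.1, acc.2 + 1)
      else acc)
      = fun acc c =>
        (acc.1 + (if ((r < ph ∧ c < pw) ∨ (r < th ∧ c < tw)) ∧ P r c = T r c then (1 : Int) else 0),
         acc.2 + (if (r < ph ∧ c < pw) ∨ (r < th ∧ c < tw) then (1 : Int) else 0)) := by
    intro r
    funext acc c
    by_cases h1 : (r < ph ∧ c < pw) ∨ (r < th ∧ c < tw)
    · by_cases h2 : P r c = T r c <;> simp [h1, h2]
    · simp [h1]
  have houter : (fun (acc : Int × Int) (r : Nat) =>
      (List.range cw).foldl (fun acc c =>
        if (r < ph ∧ c < pw) ∨ (r < th ∧ c < tw) then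
          if P r c = T r c then ((acc.1, acc.2 + 1).1 + 1, (acc.1, acc.2 + 1).2)
          else (acc.1, acc.2 + 1)
        else acc) acc)
      = fun acc r =>
        (acc.1 + ∑ c ∈ Finset.range cw,
           (if ((r < ph ∧ c < pw) ∨ (r < th ∧ c < tw)) ∧ P r c = T r c then (1 : Int) else 0),
         acc.2 + ∑ c ∈ Finset.range cw,
           (if (r < ph ∧ c < pw) ∨ (r < th ∧ c < tw) then (1 : Int) else 0)) := by
    funext acc r
    rw [hinner r, pv_foldl_range_pair]
  rw [houter, pv_foldl_range_pair]
  simp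

-- B's prediction-region fold evaluates to a sum
theorem pv_B_eval1 (ph pw th tw : Nat) (pd td : Nat → Nat → Int) (pad : Int) (init : Int) :
    (List.range ph).foldl (fun m r => (List.range pw).foldl (fun m c =>
        if r < th ∧ c < tw then if pd r c = td r c then m + 1 else m
        else if pd r c = pad then m + 1 else m) m) init
      = init + ∑ r ∈ Finset.range ph, ∑ c ∈ Finset.range pw,
          (if r < th ∧ c < tw then (if pd r c = td r c then (1 : Int) else 0)
           else (if pd r c = pad then (1 : Int) else 0)) := by
  have hinner : ∀ r : Nat, (fun (m : Int) (c : Nat) =>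
      if r < th ∧ c < tw then if pd r c = td r c then m + 1 else m
      else if pd r c = pad then m + 1 else m)
      = fun m c => m + (if r < th ∧ c < tw then (if pd r c = td r c then (1 : Int) else 0)
          else (if pd r c = pad then (1 : Int) else 0)) := by
    intro r
    funext m c
    split_ifs <;> simp
  have houter : (fun (m : Int) (r : Nat) => (List.range pw).foldl (fun m c =>
      if r < th ∧ c < tw then if pd r c = td r c then m + 1 else m
      else if pd r c = pad then m + 1 else m) m)
      = fun m r => m + ∑ c ∈ Finset.range pw,
          (if r < th ∧ c < tw then (if pd r c = td r c then (1 : Int) else 0)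
           else (if pd r c = pad then (1 : Int) else 0)) := by
    funext m r
    rw [hinner r, pv_foldl_range_add]
  rw [houter, pv_foldl_range_add]

-- B's truth-only fold evaluates to a sum
theorem pv_B_eval2 (ph pw th tw : Nat) (td : Nat → Nat → Int) (pad : Int) (init : Int) :
    (List.range th).foldl (fun m r => (List.range tw).foldl (fun m c =>
        if ¬(r < ph ∧ c < pw) ∧ td r c = pad then m + 1 else m) m) init
      = init + ∑ r ∈ Finset.range th, ∑ c ∈ Finset.range tw,
          (if ¬(r < ph ∧ c < pw) ∧ td r c = pad then (1 : Int) else 0) := by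
  have hinner : ∀ r : Nat, (fun (m : Int) (c : Nat) =>
      if ¬(r < ph ∧ c < pw) ∧ td r c = pad then m + 1 else m)
      = fun m c => m + (if ¬(r < ph ∧ c < pw) ∧ td r c = pad then (1 : Int) else 0) := by
    intro r
    funext m c
    split_ifs <;> simp
  have houter : (fun (m : Int) (r : Nat) => (List.range tw).foldl (fun m c =>
      if ¬(r < ph ∧ c < pw) ∧ td r c = pad then m + 1 else m) m)
      = fun m r => m + ∑ c ∈ Finset.range tw,
          (if ¬(r < ph ∧ c < pw) ∧ td r c = pad then (1 : Int) else 0) := by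
    funext m r
    rw [hinner r, pv_foldl_range_add]
  rw [houter, pv_foldl_range_add]

-- the matched count over the union box splits into B's two region sums
theorem pv_matched_eq (pred tg : List (List Int)) (pad : Int) :
    ∑ r ∈ Finset.range (max tg.length pred.length),
      ∑ c ∈ Finset.range (max tg.headI.length pred.headI.length),
        (if ((r < pred.length ∧ c < pred.headI.length) ∨ (r < tg.length ∧ c < tg.headI.length)) ∧
            ((pv_pad_grid pred (max tg.length pred.length) (max tg.headI.length pred.headI.length) pad).getD r []).getD c 0
              = ((pv_pad_grid tg (max tg.length pred.length) (max tg.headI.length pred.headI.length) pad).getD r []).getD c 0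
          then (1 : Int) else 0)
      = (∑ r ∈ Finset.range pred.length, ∑ c ∈ Finset.range pred.headI.length,
          (if r < tg.length ∧ c < tg.headI.length then
             (if (pred.getD r []).getD c 0 = (tg.getD r []).getD c 0 then (1 : Int) else 0)
           else (if (pred.getD r []).getD c 0 = pad then (1 : Int) else 0)))
        + (∑ r ∈ Finset.range tg.length, ∑ c ∈ Finset.range tg.headI.length,
            (if ¬(r < pred.length ∧ c < pred.headI.length) ∧ (tg.getD r []).getD c 0 = pad
             then (1 : Int) else 0)) := by
  have key : ∀ r ∈ Finset.range (max tg.length pred.length),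
      ∀ c ∈ Finset.range (max tg.headI.length pred.headI.length),
      (if ((r < pred.length ∧ c < pred.headI.length) ∨ (r < tg.length ∧ c < tg.headI.length)) ∧
          ((pv_pad_grid pred (max tg.length pred.length) (max tg.headI.length pred.headI.length) pad).getD r []).getD c 0
            = ((pv_pad_grid tg (max tg.length pred.length) (max tg.headI.length pred.headI.length) pad).getD r []).getD c 0
        then (1 : Int) else 0)
      = (if r < pred.length ∧ c < pred.headI.length then
           (if r < tg.length ∧ c < tg.headI.length then
              (if (pred.getD r []).getD c 0 = (tg.getD r []).getD c 0 then (1 : Int) else 0)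
            else (if (pred.getD r []).getD c 0 = pad then (1 : Int) else 0))
         else 0)
        + (if r < tg.length ∧ c < tg.headI.length then
            (if ¬(r < pred.length ∧ c < pred.headI.length) ∧ (tg.getD r []).getD c 0 = pad
             then (1 : Int) else 0)
           else 0) := by
    intro r hr c hc
    rw [pv_pad_getD pred _ _ pad (le_max_right _ _) (le_max_right _ _) r c
        (Finset.mem_range.1 hr) (Finset.mem_range.1 hc),
      pv_pad_getD tg _ _ pad (le_max_left _ _) (le_max_left _ _) r c
        (Finset.mem_range.1 hr) (Finset.mem_range.1 hc)]
    by_cases hP : r < pred.length ∧ c < pred.headI.length <;>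
      by_cases hT : r < tg.length ∧ c < tg.headI.length <;>
      simp only [hP, hT, not_true, not_false_iff, true_and, false_and,
        or_true, or_false, and_true, if_pos, if_neg] <;>
      (try split_ifs) <;> omega
  rw [Finset.sum_congr rfl (fun r hr => Finset.sum_congr rfl (fun c hc => key r hr c hc))]
  simp only [Finset.sum_add_distrib]
  rw [pv_sum_box _ _ _ _ _ (le_max_right _ _) (le_max_right _ _),
    pv_sum_box _ _ _ _ _ (le_max_left _ _) (le_max_left _ _)]

-- ===== VERDICT (by name: the statement is the Claim_ definition above) =====
theorem calculate_union_accuracy_spec : Claim_equal_calculate_union_accuracy := by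
  intro pred_grid true_grid pad_value _hdom _hpre
  unfold Spec_calculate_union_accuracy
  simp only [calculate_union_accuracy, calculate_union_accuracy_alt, pv_w_eq]
  rw [pv_A_eval, pv_B_eval1, pv_B_eval2, Prod.mk.injEq]
  constructor
  · rw [pv_matched_eq pred_grid true_grid pad_value]
    simp
  · rw [pv_union_count]
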